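-- pv_equiv track=rewrite | github.com/codingteam/icfpc-2024 | data/lambdaman/verify_lambdaman.py | to_2D
-- ===== SOURCE A (Python) =====
-- def to_2D(task):
--     res = []
--     lines = task.split("\n")
--     for line in lines:
--         res.append([*line])
--     while [] in res:
--         res.remove([])
--     return res
-- ===== SOURCE B (Python) =====
-- def to_2D(task):
--     res = []
--     row = []
--     for ch in task:
--         if ch == "\n":
--             if row:
--                 res.append(row)
--             row = []
--         else:
--             row.append(ch)
--     if row:
--         res.append(row)
--     return res
-- ===== Notes on version B (the rewrite author's own statement) =====
-- stated objective: alternative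
-- what changed: Replaced A's split-into-lines pipeline with its repeated list rescans that delete empty rows with a single character-by-character pass that accumulates rows and emits only non-empty ones.
import Mathlib
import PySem

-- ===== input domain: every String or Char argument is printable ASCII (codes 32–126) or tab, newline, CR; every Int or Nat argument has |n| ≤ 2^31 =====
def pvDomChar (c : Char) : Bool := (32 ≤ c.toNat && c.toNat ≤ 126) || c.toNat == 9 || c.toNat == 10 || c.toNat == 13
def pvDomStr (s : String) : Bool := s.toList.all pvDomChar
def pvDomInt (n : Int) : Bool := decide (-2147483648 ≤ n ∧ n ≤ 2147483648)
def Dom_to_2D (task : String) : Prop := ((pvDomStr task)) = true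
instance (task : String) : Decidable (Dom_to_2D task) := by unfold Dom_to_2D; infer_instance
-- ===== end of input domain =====

-- B replaces A's split pipeline with repeated empty-row removal by a single character scan
-- that accumulates rows and emits only non-empty ones (objective: alternative decomposition).

-- ===== PORT A =====
-- the removal loop: Python list.remove removes the FIRST occurrence,
-- which is List.erase (PySem.List.remove? res [] = some (res.erase []) when [] ∈ res,
-- cf. PySem.List.remove?_eq_some_erase); the while-loop is this recursion.
def pvRemoveEmpties (res : List (List String)) : List (List String) :=
  if h : ([] : List String) ∈ res then pvRemoveEmpties (res.erase []) else res
termination_by res.length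
decreasing_by
  have h1 := List.length_erase_of_mem h
  have h2 := List.length_pos_of_mem h
  omega

-- task.split("\n") with the non-empty separator "\n" is exactly PySem.Chars.splitOn
-- on the code points (PySem.Str.split? returns some of it for a non-empty sep);
-- [*line] is the list of its 1-character strings.
def to_2D (task : String) : List (List String) :=
  let lines := PySem.Chars.splitOn task.toList ['\n']
  let res := lines.foldl (fun res line => res ++ [line.map (fun c => String.mk [c])]) []
  pvRemoveEmpties res

-- ===== PORT B =====
def to_2D_alt (task : String) : List (List String) :=
  let p := task.toList.foldl
    (fun (st : List (List String) × List String) ch =>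
      if ch = '\n' then
        (if st.2 ≠ [] then st.1 ++ [st.2] else st.1, [])
      else
        (st.1, st.2 ++ [String.mk [ch]]))
    ([], [])
  if p.2 ≠ [] then p.1 ++ [p.2] else p.1

-- ===== PRECONDITION & SPEC =====
def Spec_to_2D (task : String) (out : List (List String)) : Prop := out = to_2D_alt task
instance (task : String) (out : List (List String)) : Decidable (Spec_to_2D task out) := by unfold Spec_to_2D; infer_instance

-- ===== CLAIM (what is proved, stated in full; the proofs are below) =====
def Claim_equal_to_2D : Prop := ∀ (task : String), Dom_to_2D task → Spec_to_2D task (to_2D task)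

-- ===== LEMMAS AND PROOFS =====

-- the line structure of the input: pvRows cs = cs split at '\n' (empty pieces kept)
def pvRows : List Char → List (List Char)
  | [] => [[]]
  | c :: r => if c = '\n' then [] :: pvRows r else (pvRows r).modifyHead (c :: ·)

def pvStrmap (l : List Char) : List String := l.map (fun c => String.mk [c])

theorem pvRows_ne_nil (cs : List Char) : pvRows cs ≠ [] := by
  induction cs with
  | nil => simp [pvRows]
  | cons c r ih =>
    simp only [pvRows]; split
    · simp
    · cases h : pvRows r with
      | nil => exact absurd h ih
      | cons a t => simp

theorem modifyHead_id' {α : Type} (l : List α) : l.modifyHead (fun x => x) = l := by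
  cases l <;> simp

theorem go_spec (fuel : Nat) : ∀ (cs cur : List Char) (acc : List (List Char)),
    cs.length ≤ fuel →
    PySem.Chars.splitOn.go ['\n'] fuel cs cur acc
      = acc.reverse ++ (pvRows cs).modifyHead (cur.reverse ++ ·) := by
  induction fuel with
  | zero =>
    intro cs cur acc h
    have : cs = [] := List.eq_nil_of_length_eq_zero (Nat.le_zero.mp h)
    subst this
    simp [PySem.Chars.splitOn.go, pvRows]
  | succ n ih =>
    intro cs cur acc h
    cases cs with
    | nil => simp [PySem.Chars.splitOn.go, pvRows]
    | cons c rest =>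
      rw [PySem.Chars.splitOn.go]
      by_cases hc : c = '\n'
      · subst hc
        rw [if_pos (by simp [List.isPrefixOf])]
        simp only [List.length_cons] at h
        rw [ih _ _ _ (by simpa using Nat.le_of_succ_le_succ h)]
        simp [pvRows, modifyHead_id']
      · rw [if_neg (by simp [List.isPrefixOf]; intro hh; exact absurd hh.symm hc)]
        simp only [List.length_cons] at h
        rw [ih _ _ _ (Nat.le_of_succ_le_succ h)]
        simp only [pvRows, if_neg hc]
        congr 1
        cases hn : pvRows rest with
        | nil => exact absurd hn (pvRows_ne_nil rest)
        | cons a t => simp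

theorem splitOn_eq_pvRows (cs : List Char) :
    PySem.Chars.splitOn cs ['\n'] = pvRows cs := by
  rw [PySem.Chars.splitOn, go_spec (cs.length + 1) cs [] [] (by omega)]
  cases h : pvRows cs with
  | nil => exact absurd h (pvRows_ne_nil cs)
  | cons a t => simp

-- A's append loop is map
theorem foldl_append_map (lines : List (List Char)) (acc : List (List String)) :
    lines.foldl (fun res line => res ++ [line.map (fun c => String.mk [c])]) acc
      = acc ++ lines.map pvStrmap := by
  induction lines generalizing acc with
  | nil => simp
  | cons l t ih => simp [ih, pvStrmap]

theorem filter_erase_nil (l : List (List String)) :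
    (l.erase []).filter (fun x => !x.isEmpty) = l.filter (fun x => !x.isEmpty) := by
  induction l with
  | nil => simp
  | cons a t ih =>
    by_cases ha : a = ([] : List String)
    · subst ha; simp
    · rw [List.erase_cons_tail (by simpa using ha)]
      cases a with
      | nil => exact absurd rfl ha
      | cons x xs => simp [ih]

theorem pvRemoveEmpties_eq_filter (l : List (List String)) :
    pvRemoveEmpties l = l.filter (fun x => !x.isEmpty) := by
  induction l using pvRemoveEmpties.induct with
  | case1 res h ih => rw [pvRemoveEmpties, dif_pos h, ih, filter_erase_nil]
  | case2 res h =>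
    rw [pvRemoveEmpties, dif_neg h, Eq.comm, List.filter_eq_self]
    intro a ha
    cases a with
    | nil => exact absurd ha h
    | cons x xs => simp

def pvStep (st : List (List String) × List String) (ch : Char) :
    List (List String) × List String :=
  if ch = '\n' then
    (if st.2 ≠ [] then st.1 ++ [st.2] else st.1, [])
  else
    (st.1, st.2 ++ [String.mk [ch]])

def pvFinish (p : List (List String) × List String) : List (List String) :=
  if p.2 ≠ [] then p.1 ++ [p.2] else p.1

theorem to_2D_alt_eq (task : String) :
    to_2D_alt task = pvFinish (task.toList.foldl pvStep ([], [])) := rfl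

theorem B_inv (cs : List Char) : ∀ (acc : List (List String)) (row : List String),
    pvFinish (cs.foldl pvStep (acc, row))
      = acc ++ (((pvRows cs).map pvStrmap).modifyHead (row ++ ·)).filter
          (fun x => !x.isEmpty) := by
  induction cs with
  | nil =>
    intro acc row
    cases row <;> simp [pvRows, pvStrmap, pvFinish]
  | cons c rest ih =>
    intro acc row
    by_cases hc : c = '\n'
    · subst hc
      simp only [List.foldl_cons, pvStep, if_true]
      rw [ih]
      simp only [pvRows, if_true, List.map_cons]
      cases hn : (pvRows rest).map pvStrmap with
      | nil => exact absurd (List.map_eq_nil_iff.mp hn) (pvRows_ne_nil rest)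
      | cons a t =>
        cases row with
        | nil => simp [pvStrmap]
        | cons r rs => simp [pvStrmap]
    · simp only [List.foldl_cons, pvStep, if_neg hc]
      rw [ih]
      simp only [pvRows, if_neg hc]
      cases hn : pvRows rest with
      | nil => exact absurd hn (pvRows_ne_nil rest)
      | cons a t => simp [pvStrmap]

-- ===== VERDICT (by name: the statement is the Claim_ definition above) =====
theorem to_2D_spec : Claim_equal_to_2D := by
  intro task _
  unfold Spec_to_2D
  rw [to_2D_alt_eq, B_inv]
  show pvRemoveEmpties _ = _
  rw [splitOn_eq_pvRows, foldl_append_map, pvRemoveEmpties_eq_filter]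
  cases hn : (pvRows task.toList).map pvStrmap with
  | nil => exact absurd (List.map_eq_nil_iff.mp hn) (pvRows_ne_nil task.toList)
  | cons a t => simp
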